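-- pv_equiv track=rewrite | github.com/davidfaianunes/Programming-s-Fundamentals-Project | main.py | corrigir_palavra
-- ===== SOURCE A (Python) =====
-- def corrigir_palavra(word: str) -> str:
--     """
--     This function takes a string (potentially modified by a burst of letters) and
--     returns the resulting string from removing the adjacent lowercase/uppercase pairs of the same letter,
--     over and over, until there aren't any pairs of this nature left to remove.
--
--
--     :param word: str
--     :return: str
--     """
--
--
--     # The variable was_removed was made for looping the removal of adjancent lowercase/uppercase pairs of the same letter,
--     # until no pair is removed for one passage (in which case, was_removed = False, closing the while loop).
--
--     words_list = list(word)
--     corrected_word = ""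
--     was_removed = True
--     while was_removed == True:
--
--         was_removed = False
--         letter_order = 0
--
--         # The letter_order is gonna be incremented by 1 until it references every pair of adjacent characters in the string
--
--         while letter_order < len(words_list) - 1:
--
--             # Verifies if two adjacent characters are of different capitalization (lower/upper or upper/lower)
--             # Then if two adjacent characters are of the same letter (by making them lowercase, to disregard capitalization)
--
--             if words_list[letter_order].islower() != words_list[letter_order + 1].islower()\
--             and words_list[letter_order].lower() == words_list[letter_order + 1].lower():
--                 del words_list[letter_order:letter_order + 2]
--                 was_removed = True
--
--             letter_order += 1
--
--     for letter in words_list: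
--         corrected_word += letter
--     return corrected_word
-- ===== SOURCE B (Python) =====
-- def corrigir_palavra(word: str) -> str:
--     """Single-pass stack cancellation: push each character; if it forms a
--     lowercase/uppercase pair of the same letter with the top of the stack,
--     pop instead. O(n) instead of repeated quadratic passes."""
--     stack = []
--     for c in word:
--         if stack and stack[-1].islower() != c.islower() and stack[-1].lower() == c.lower():
--             stack.pop()
--         else:
--             stack.append(c)
--     return ''.join(stack)
-- ===== Notes on version B (the rewrite author's own statement) =====
-- stated objective: faster
-- what changed: Replaces A's repeated index-scanning passes that delete adjacent lower/upper pairs until a pass removes nothing with a single left-to-right pass over the string keeping a stack, popping when the new character cancels the stack top (the reduction is confluent, so the normal form is the same).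
import Mathlib
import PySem

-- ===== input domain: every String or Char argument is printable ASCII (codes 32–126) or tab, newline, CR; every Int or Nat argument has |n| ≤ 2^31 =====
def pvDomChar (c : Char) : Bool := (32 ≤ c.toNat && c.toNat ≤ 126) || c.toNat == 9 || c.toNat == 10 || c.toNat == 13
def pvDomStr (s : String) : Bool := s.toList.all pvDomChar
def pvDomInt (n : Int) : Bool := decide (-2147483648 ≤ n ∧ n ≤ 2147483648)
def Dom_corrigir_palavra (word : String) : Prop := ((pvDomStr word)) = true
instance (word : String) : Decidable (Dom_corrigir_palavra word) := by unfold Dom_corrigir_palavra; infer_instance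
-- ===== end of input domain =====

-- B replaces A's repeated index-scanning removal passes with one linear stack pass; same return value.

-- ===== PORT A =====
-- the condition of A's if: adjacent pair of different capitalization, same letter
def pvCancel (a b : Char) : Bool :=
  (PySem.Chars.islower a != PySem.Chars.islower b) &&
  (PySem.Chars.lowerChar a == PySem.Chars.lowerChar b)

-- del words_list[letter_order:letter_order + 2]
def pvDel (l : List Char) (i : Nat) : List Char := l.take i ++ l.drop (i + 2)

-- inner while loop over (words_list, letter_order, was_removed); the fuel argument only
-- makes the loop total: letter_order grows by 1 each step and the list never grows, so
-- l.length steps are never exhausted before the loop condition fails (pvInnerGo_exit below)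
def pvInnerGo : Nat → List Char → Nat → Bool → List Char × Bool
  | 0, l, _, rem => (l, rem)
  | n + 1, l, i, rem =>
    if i < l.length - 1 then
      if pvCancel (l.getD i ' ') (l.getD (i + 1) ' ') then
        pvInnerGo n (pvDel l i) (i + 1) true
      else
        pvInnerGo n l (i + 1) rem
    else (l, rem)

def pvInner (l : List Char) (i : Nat) (rem : Bool) : List Char × Bool :=
  pvInnerGo l.length l i rem

-- outer while loop over was_removed; the fuel argument only makes the loop total:
-- a pass that still removes something shrinks the list by at least 2 (pvInner_length below),
-- so l.length + 1 rounds are never exhausted before was_removed settles at False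
def pvOuterGo : Nat → List Char → List Char
  | 0, l => l
  | n + 1, l =>
    let p := pvInner l 0 false
    if p.2 then pvOuterGo n p.1 else p.1

def pvOuter (l : List Char) : List Char := pvOuterGo (l.length + 1) l

def corrigir_palavra (word : String) : String :=
  -- final for-loop: corrected_word += letter
  String.mk ((pvOuter word.toList).foldl (fun acc c => acc ++ [c]) [])

-- ===== PORT B =====
-- one stack step: pop on a cancelling top, else push (stack stored top-first)
def pvStep (s : List Char) (c : Char) : List Char :=
  match s with
  | [] => [c]
  | t :: s' => if pvCancel t c then s' else c :: t :: s'

def corrigir_palavra_alt (word : String) : String :=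
  String.mk ((word.toList.foldl pvStep []).reverse)

-- ===== PRECONDITION & SPEC =====
def Spec_corrigir_palavra (word : String) (out : String) : Prop := out = corrigir_palavra_alt word
instance (word : String) (out : String) : Decidable (Spec_corrigir_palavra word out) := by unfold Spec_corrigir_palavra; infer_instance

-- ===== CLAIM (what is proved, stated in full; the proofs are below) =====
def Claim_equal_corrigir_palavra : Prop := ∀ (word : String), Dom_corrigir_palavra word → Spec_corrigir_palavra word (corrigir_palavra word)

-- ===== LEMMAS AND PROOFS =====

theorem char_eq_of_toNat {a b : Char} (h : a.toNat = b.toNat) : a = b :=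
  Char.ext (UInt32.toNat_inj.mp h)

theorem islower_iff (c : Char) : PySem.Chars.islower c = true ↔ (97 ≤ c.toNat ∧ c.toNat ≤ 122) := by
  unfold PySem.Chars.islower
  rw [Bool.and_eq_true, decide_eq_true_iff, decide_eq_true_iff, Char.le_def, Char.le_def,
    UInt32.le_iff_toNat_le, UInt32.le_iff_toNat_le]
  exact Iff.rfl

theorem isupper_iff (c : Char) : PySem.Chars.isupper c = true ↔ (65 ≤ c.toNat ∧ c.toNat ≤ 90) := by
  unfold PySem.Chars.isupper
  rw [Bool.and_eq_true, decide_eq_true_iff, decide_eq_true_iff, Char.le_def, Char.le_def,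
    UInt32.le_iff_toNat_le, UInt32.le_iff_toNat_le]
  exact Iff.rfl

theorem toNat_ofNat_letter {n : Nat} (h : n < 200) : (Char.ofNat n).toNat = n := by
  have hv : n.isValidChar := by unfold Nat.isValidChar; omega
  simp [Char.ofNat, Char.ofNatAux, hv, Char.toNat]

theorem lowerChar_of_not_upper {c : Char} (h : PySem.Chars.isupper c = false) :
    PySem.Chars.lowerChar c = c := by
  simp [PySem.Chars.lowerChar, h]

-- a cancelling pair is a lowercase ASCII letter next to its own uppercase (one order or the other)
theorem pvCancel_char {a b : Char} (h : pvCancel a b = true) :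
    (a.toNat = b.toNat + 32 ∧ PySem.Chars.islower a = true ∧ PySem.Chars.islower b = false) ∨
    (b.toNat = a.toNat + 32 ∧ PySem.Chars.islower b = true ∧ PySem.Chars.islower a = false) := by
  simp only [pvCancel, Bool.and_eq_true, bne_iff_ne, beq_iff_eq] at h
  obtain ⟨hne, hlo⟩ := h
  cases ha : PySem.Chars.islower a with
  | false =>
    have hb : PySem.Chars.islower b = true := by
      cases hb : PySem.Chars.islower b
      · rw [ha, hb] at hne; exact absurd rfl hne
      · rfl
    right
    refine ⟨?_, hb, rfl⟩
    have hbr := (islower_iff b).mp hb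
    have hbu : PySem.Chars.isupper b = false := by
      cases hu : PySem.Chars.isupper b
      · rfl
      · have := (isupper_iff b).mp hu; omega
    rw [lowerChar_of_not_upper hbu] at hlo
    by_cases hua : PySem.Chars.isupper a = true
    · have har := (isupper_iff a).mp hua
      simp only [PySem.Chars.lowerChar, hua, if_true] at hlo
      have hx : (Char.ofNat (a.toNat + 32)).toNat = a.toNat + 32 :=
        toNat_ofNat_letter (by omega)
      rw [hlo] at hx
      omega
    · rw [lowerChar_of_not_upper (by cases hu : PySem.Chars.isupper a; rfl; exact absurd hu hua)] at hlo
      rw [hlo] at ha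
      rw [ha] at hb
      exact absurd hb (by simp)
  | true =>
    have hb : PySem.Chars.islower b = false := by
      cases hb : PySem.Chars.islower b
      · rfl
      · rw [ha, hb] at hne; exact absurd rfl hne
    left
    refine ⟨?_, rfl, hb⟩
    have har := (islower_iff a).mp ha
    have hau : PySem.Chars.isupper a = false := by
      cases hu : PySem.Chars.isupper a
      · rfl
      · have := (isupper_iff a).mp hu; omega
    rw [lowerChar_of_not_upper hau] at hlo
    by_cases hub : PySem.Chars.isupper b = true
    · have hbr := (isupper_iff b).mp hub
      simp only [PySem.Chars.lowerChar, hub, if_true] at hlo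
      have hx : (Char.ofNat (b.toNat + 32)).toNat = b.toNat + 32 :=
        toNat_ofNat_letter (by omega)
      rw [← hlo] at hx
      omega
    · rw [lowerChar_of_not_upper (by cases hu : PySem.Chars.isupper b; rfl; exact absurd hu hub)] at hlo
      rw [← hlo] at hb
      rw [hb] at ha
      exact absurd ha (by simp)

-- the two outer characters of a doubly-cancelling triple are the same character
theorem pvCancel_trans {a b c : Char} (h1 : pvCancel a b = true) (h2 : pvCancel b c = true) :
    a = c := by
  rcases pvCancel_char h1 with ⟨e1, la, lb⟩ | ⟨e1, lb, la⟩ <;>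
  rcases pvCancel_char h2 with ⟨e2, lb2, lc⟩ | ⟨e2, lc, lb2⟩ <;>
    [skip; exact char_eq_of_toNat (by omega); exact char_eq_of_toNat (by omega); skip] <;>
  · rw [lb] at lb2; cases lb2

-- stacks reached by B's fold contain no cancelling pair (top-first storage)
def pvReduced (s : List Char) : Prop := List.IsChain (fun a b => pvCancel b a = false) s

theorem pvStep_reduced {s : List Char} (hs : pvReduced s) (c : Char) : pvReduced (pvStep s c) := by
  match s with
  | [] => simp [pvStep, pvReduced]
  | t :: s' =>
    have hdef : pvStep (t :: s') c = if pvCancel t c = true then s' else c :: t :: s' := rfl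
    unfold pvReduced at *
    rw [hdef]
    split_ifs with hc
    · exact hs.of_cons
    · exact List.isChain_cons_cons.mpr ⟨by simp_all, hs⟩

theorem pvFold_reduced (l : List Char) : ∀ s, pvReduced s → pvReduced (List.foldl pvStep s l) := by
  induction l with
  | nil => intro s hs; exact hs
  | cons c l ih => intro s hs; exact ih _ (pvStep_reduced hs c)

-- folding over a cancelling pair from a reduced stack is a no-op
theorem pvFold_cancel_pair {x y : Char} (h : pvCancel x y = true) :
    ∀ (v s : List Char), pvReduced s → List.foldl pvStep s (x :: y :: v) = List.foldl pvStep s v := by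
  intro v s hs
  match s with
  | [] => simp [List.foldl, pvStep, h]
  | t :: s' =>
    cases hc : pvCancel t x
    · simp [List.foldl, pvStep, hc, h]
    · have hty : t = y := pvCancel_trans hc h
      simp only [List.foldl, pvStep, hc, if_true]
      match s' with
      | [] => simp [hty]
      | u :: s'' =>
        have hut : pvCancel u t = false := (List.isChain_cons_cons.mp hs).1
        simp [← hty, hut]

-- deleting one cancelling pair anywhere does not change B's fold
theorem pvNorm_del {x y : Char} (h : pvCancel x y = true) (u v : List Char) :
    List.foldl pvStep [] (u ++ x :: y :: v) = List.foldl pvStep [] (u ++ v) := by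
  rw [List.foldl_append, List.foldl_append]
  exact pvFold_cancel_pair h v _ (pvFold_reduced u [] (by simp [pvReduced]))

-- in a chain, any two adjacent elements are related
theorem isChain_adj {R : Char → Char → Prop} :
    ∀ (u : List Char) {a b : Char} {w : List Char}, List.IsChain R (u ++ a :: b :: w) → R a b := by
  intro u
  induction u with
  | nil => intro a b w h; exact (List.isChain_cons_cons.mp h).1
  | cons x u ih => intro a b w h; exact ih (List.IsChain.of_cons (by simpa using h))

-- on a list without cancelling pairs B's fold is the reversed identity
theorem pvFold_of_chain : ∀ (l s : List Char),
    List.IsChain (fun a b => pvCancel a b = false) (s.reverse ++ l) →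
    List.foldl pvStep s l = l.reverse ++ s := by
  intro l
  induction l with
  | nil => intro s _; simp
  | cons x l ih =>
    intro s hch
    have hstep : pvStep s x = x :: s := by
      match s with
      | [] => rfl
      | t :: s' =>
        have htx : pvCancel t x = false := by
          have : (t :: s').reverse ++ x :: l = s'.reverse ++ t :: x :: l := by simp
          rw [this] at hch
          exact isChain_adj s'.reverse hch
        simp [pvStep, htx]
    have hch' : List.IsChain (fun a b => pvCancel a b = false) ((x :: s).reverse ++ l) := by
      have : (x :: s).reverse ++ l = s.reverse ++ x :: l := by simp
      rw [this]
      exact hch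
    calc List.foldl pvStep s (x :: l) = List.foldl pvStep (x :: s) l := by rw [List.foldl_cons, hstep]
    _ = l.reverse ++ x :: s := ih (x :: s) hch'
    _ = (x :: l).reverse ++ s := by simp

-- the list splits at any in-range index into prefix, the two scanned characters, and the rest
theorem pvSplit (l : List Char) (i : Nat) (h : i + 1 < l.length) :
    l = l.take i ++ l[i] :: l[i+1] :: l.drop (i + 2) := by
  conv_lhs => rw [← List.take_append_drop i l]
  rw [List.drop_eq_getElem_cons (by omega), List.drop_eq_getElem_cons (by omega)]

-- one pass of A preserves B's fold
theorem pvInnerGo_norm : ∀ (n : Nat) (l : List Char) (i : Nat) (rem : Bool),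
    List.foldl pvStep [] (pvInnerGo n l i rem).1 = List.foldl pvStep [] l := by
  intro n
  induction n with
  | zero => intro l i rem; rfl
  | succ n ih =>
      intro l i rem
      rw [pvInnerGo]
      split_ifs with h hc
      · have hlt : i + 1 < l.length := by omega
        rw [List.getD_eq_getElem l ' ' (by omega), List.getD_eq_getElem l ' ' hlt] at hc
        rw [ih]
        have := pvNorm_del hc (l.take i) (l.drop (i + 2))
        unfold pvDel
        rw [this.symm, ← pvSplit l i hlt]
      · exact ih l (i + 1) rem
      · rfl

theorem pvInner_norm (l : List Char) (i : Nat) (rem : Bool) :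
    List.foldl pvStep [] (pvInner l i rem).1 = List.foldl pvStep [] l :=
  pvInnerGo_norm l.length l i rem

-- once was_removed is true it stays true
theorem pvInnerGo_flag_mono : ∀ (n : Nat) (l : List Char) (i : Nat),
    (pvInnerGo n l i true).2 = true := by
  intro n
  induction n with
  | zero => intro l i; rfl
  | succ n ih =>
      intro l i
      rw [pvInnerGo]
      split_ifs with h hc
      · exact ih _ _
      · exact ih _ _
      · rfl

-- a pass with enough fuel that removed nothing left the list unchanged and saw no cancelling pair
theorem pvInnerGo_nofind : ∀ (n : Nat) (l : List Char) (i : Nat) (rem : Bool),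
    l.length ≤ n + i →
    (pvInnerGo n l i rem).2 = false →
    (pvInnerGo n l i rem).1 = l ∧
    ∀ j, i ≤ j → j + 1 < l.length → pvCancel (l.getD j ' ') (l.getD (j + 1) ' ') = false := by
  intro n
  induction n with
  | zero =>
      intro l i rem hn _
      exact ⟨rfl, fun j hij hj => by simp [pvInnerGo] at *; omega⟩
  | succ n ih =>
      intro l i rem hn
      rw [pvInnerGo]
      split_ifs with h hc
      · intro hfl
        rw [pvInnerGo_flag_mono] at hfl
        cases hfl
      · intro hfl
        obtain ⟨h1, h2⟩ := ih l (i + 1) rem (by omega) hfl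
        refine ⟨h1, fun j hij hj => ?_⟩
        rcases Nat.eq_or_lt_of_le hij with rfl | hij'
        · simpa using hc
        · exact h2 j hij' hj
      · intro _
        exact ⟨rfl, fun j hij hj => by omega⟩

theorem pvInner_nofind (l : List Char) (i : Nat) (rem : Bool) :
    (pvInner l i rem).2 = false →
    (pvInner l i rem).1 = l ∧
    ∀ j, i ≤ j → j + 1 < l.length → pvCancel (l.getD j ' ') (l.getD (j + 1) ' ') = false :=
  pvInnerGo_nofind l.length l i rem (by omega)

-- a pass that removed something shrank the list (the outer fuel l.length + 1 is sufficient)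
theorem pvInnerGo_length : ∀ (n : Nat) (l : List Char) (i : Nat) (rem : Bool),
    (pvInnerGo n l i rem).1.length ≤ l.length ∧
    (rem = false → (pvInnerGo n l i rem).2 = true → (pvInnerGo n l i rem).1.length < l.length) := by
  intro n
  induction n with
  | zero => intro l i rem; simp [pvInnerGo]
  | succ n ih =>
      intro l i rem
      rw [pvInnerGo]
      split_ifs with h hc
      · have hd : (pvDel l i).length = l.length - 2 := by simp [pvDel]; omega
        obtain ⟨ih1, _⟩ := ih (pvDel l i) (i + 1) true
        exact ⟨by omega, fun _ _ => by omega⟩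
      · exact ih l (i + 1) rem
      · simp

theorem pvInner_length (l : List Char) (i : Nat) (rem : Bool) :
    (pvInner l i rem).1.length ≤ l.length ∧
    (rem = false → (pvInner l i rem).2 = true → (pvInner l i rem).1.length < l.length) :=
  pvInnerGo_length l.length l i rem

-- the outer loop preserves B's fold
theorem pvOuterGo_norm : ∀ (n : Nat) (l : List Char),
    List.foldl pvStep [] (pvOuterGo n l) = List.foldl pvStep [] l := by
  intro n
  induction n with
  | zero => intro l; rfl
  | succ n ih =>
      intro l
      show List.foldl pvStep []
        (if (pvInner l 0 false).2 then pvOuterGo n (pvInner l 0 false).1 else (pvInner l 0 false).1) = _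
      split_ifs
      · rw [ih, pvInner_norm]
      · rw [pvInner_norm]

theorem pvOuter_norm (l : List Char) :
    List.foldl pvStep [] (pvOuter l) = List.foldl pvStep [] l :=
  pvOuterGo_norm (l.length + 1) l

-- with enough fuel the outer loop's result has no cancelling adjacent pair
theorem pvOuterGo_chain : ∀ (n : Nat) (l : List Char), l.length < n →
    List.IsChain (fun a b => pvCancel a b = false) (pvOuterGo n l) := by
  intro n
  induction n with
  | zero => intro l h; omega
  | succ n ih =>
      intro l hn
      show List.IsChain _
        (if (pvInner l 0 false).2 then pvOuterGo n (pvInner l 0 false).1 else (pvInner l 0 false).1)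
      split_ifs with h
      · exact ih _ (by have := (pvInner_length l 0 false).2 rfl h; omega)
      · obtain ⟨h1, h2⟩ := pvInner_nofind l 0 false (by simpa using h)
        rw [h1, List.isChain_iff_getElem]
        intro i hi
        have := h2 i (Nat.zero_le i) (by omega)
        rw [List.getD_eq_getElem l ' ' (by omega),
          List.getD_eq_getElem l ' ' (by omega)] at this
        exact this

theorem pvOuter_chain (l : List Char) :
    List.IsChain (fun a b => pvCancel a b = false) (pvOuter l) :=
  pvOuterGo_chain (l.length + 1) l (Nat.lt_succ_self _)

-- A's result is the reverse of B's final stack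
theorem pvOuter_eq (l : List Char) : pvOuter l = (List.foldl pvStep [] l).reverse := by
  have h1 := pvFold_of_chain (pvOuter l) [] (by simpa using pvOuter_chain l)
  rw [← pvOuter_norm l, h1]
  simp

-- ===== VERDICT (by name: the statement is the Claim_ definition above) =====
theorem corrigir_palavra_spec : Claim_equal_corrigir_palavra := by
  intro word _
  unfold Spec_corrigir_palavra corrigir_palavra corrigir_palavra_alt
  rw [pvOuter_eq, PySem.List.foldl_append_singleton, List.nil_append]
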